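-- pv_equiv track=rewrite | github.com/julovlt/projet-labyrinthe | carte.py | coder_murs
-- ===== SOURCE A (Python) =====
-- def coder_murs(carte):
--     """
--     code les murs sous la forme d'un entier dont le codage binaire
--     est de la forme bNbEbSbO où bN, bE, bS et bO valent
--        soit 0 s'il n'y a pas de mur dans dans la direction correspondante
--        soit 1 s'il y a un mur dans la direction correspondante
--     bN est le chiffre des unité, BE des dizaine, etc...
--     le code obtenu permet d'obtenir l'indice du caractère semi-graphique
--     correspondant à la carte dans la liste listeCartes au début de ce fichier
--
--     :param carte: une carte
--     :return: un entier indice du caractère semi-graphique de la carte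
--     """
--     res=0
--     cpt=0
--     for mur in carte["carte_mur"]:
--         if mur==True:
--             res=res+2**cpt
--         cpt=cpt+1
--     return res
-- ===== SOURCE B (Python) =====
-- def coder_murs(carte):
--     res = 0
--     for mur in reversed(carte["carte_mur"]):
--         res = res * 2 + (1 if mur == True else 0)
--     return res
-- ===== Notes on version B (the rewrite author's own statement) =====
-- stated objective: alternative
-- what changed: B builds the bitmask with a Horner-style shift-and-add accumulator over the reversed wall list, dropping A's position counter and 2**cpt power computation.
import Mathlib
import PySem

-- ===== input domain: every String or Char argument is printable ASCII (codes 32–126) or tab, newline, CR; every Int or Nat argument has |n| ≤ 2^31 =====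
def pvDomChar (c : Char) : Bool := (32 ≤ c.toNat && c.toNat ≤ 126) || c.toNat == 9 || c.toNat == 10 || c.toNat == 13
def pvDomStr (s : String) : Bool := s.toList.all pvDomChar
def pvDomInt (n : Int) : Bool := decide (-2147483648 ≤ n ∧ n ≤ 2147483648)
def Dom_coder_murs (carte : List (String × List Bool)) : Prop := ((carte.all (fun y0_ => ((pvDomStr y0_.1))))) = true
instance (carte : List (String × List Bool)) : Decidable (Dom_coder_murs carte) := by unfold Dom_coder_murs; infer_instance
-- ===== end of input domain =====

-- B re-implements A's bitmask encoding with a Horner-style shift-and-add over the reversed wall list (alternative decomposition).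
-- A raises KeyError when "carte_mur" is absent; Pre_ excludes exactly those inputs.
-- ===== PORT A =====
-- the for-loop of A: state (res, cpt), res += 2**cpt when mur == True
def coderLoopA : List Bool → Int → Nat → Int
  | [], res, _ => res
  | mur :: rest, res, cpt =>
      coderLoopA rest (if mur then res + 2 ^ cpt else res) (cpt + 1)

def coder_murs (carte : List (String × List Bool)) : Int :=
  match (PySem.Dict.mk carte).get? "carte_mur" with
  | none => 0          -- unreachable under Pre_: Python raises KeyError here
  | some murs => coderLoopA murs 0 0

-- ===== PORT B =====
def coder_murs_alt (carte : List (String × List Bool)) : Int :=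
  match (PySem.Dict.mk carte).get? "carte_mur" with
  | none => 0          -- unreachable under Pre_: Python raises KeyError here
  | some murs =>
      murs.reverse.foldl (fun res mur => res * 2 + (if mur then 1 else 0)) 0

-- ===== PRECONDITION & SPEC =====
-- Pre_ excludes exactly the inputs where A raises KeyError ("carte_mur" key missing).
def Pre_coder_murs (carte : List (String × List Bool)) : Prop :=
  ((PySem.Dict.mk carte).get? "carte_mur").isSome = true
instance (carte : List (String × List Bool)) : Decidable (Pre_coder_murs carte) := by
  unfold Pre_coder_murs; infer_instance
def pvWitness_coder_murs : (List (String × List Bool)) := [("carte_mur", [true, false, true, true])]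

def Spec_coder_murs (carte : List (String × List Bool)) (out : Int) : Prop := out = coder_murs_alt carte
instance (carte : List (String × List Bool)) (out : Int) : Decidable (Spec_coder_murs carte out) := by unfold Spec_coder_murs; infer_instance

-- ===== CLAIM (what is proved, stated in full; the proofs are below) =====
def Claim_equal_coder_murs : Prop := ∀ (carte : List (String × List Bool)), Dom_coder_murs carte → Pre_coder_murs carte → Spec_coder_murs carte (coder_murs carte)

-- ===== LEMMAS AND PROOFS =====
-- forward value of a wall list: bit i weighted 2^i
def wallVal : List Bool → Int
  | [] => 0
  | mur :: rest => (if mur then 1 else 0) + 2 * wallVal rest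

lemma coderLoopA_eq (l : List Bool) : ∀ (res : Int) (cpt : Nat),
    coderLoopA l res cpt = res + 2 ^ cpt * wallVal l := by
  induction l with
  | nil => intro res cpt; simp [coderLoopA, wallVal]
  | cons mur rest ih =>
    intro res cpt
    simp only [coderLoopA, wallVal, ih]
    by_cases h : mur <;> simp [h, pow_succ] <;> ring

lemma hornerB_eq (l : List Bool) : ∀ (acc : Int),
    l.reverse.foldl (fun res mur => res * 2 + (if mur then 1 else 0)) acc
      = acc * 2 ^ l.length + wallVal l := by
  induction l with
  | nil => intro acc; simp [wallVal]
  | cons mur rest ih =>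
    intro acc
    simp only [List.reverse_cons, List.foldl_append, List.foldl_cons, List.foldl_nil,
      ih, wallVal, List.length_cons, pow_succ]
    ring

-- ===== VERDICT (by name: the statement is the Claim_ definition above) =====
theorem coder_murs_spec : Claim_equal_coder_murs := by
  intro carte _ _
  unfold Spec_coder_murs coder_murs coder_murs_alt
  cases h : (PySem.Dict.mk carte).get? "carte_mur" with
  | none => rfl
  | some murs => simp only [h]; rw [coderLoopA_eq, hornerB_eq]; ring
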